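-- pv_equiv track=rewrite | github.com/ccortesra/WumpusWorld | Wumpus-gpt.py | is_there_adjacent
-- ===== SOURCE A (Python) =====
-- def is_there_adjacent(array_cells, cell):
--
--     for pit in array_cells:
--         x_cell = cell[0]
--         y_cell = cell[1]
--
--         x_pit = pit[0]
--         y_pit = pit[1]
--
--         if abs(x_cell - x_pit) == 1 and y_cell - y_pit == 0:
--             return True
--         elif abs(y_cell - y_pit) == 1 and x_cell - x_pit == 0:
--             return True
--     return False
-- ===== SOURCE B (Python) =====
-- def is_there_adjacent(array_cells, cell):
--     cells = {(p[0], p[1]) for p in array_cells}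
--     x, y = cell[0], cell[1]
--     return any(n in cells for n in ((x + 1, y), (x - 1, y), (x, y + 1), (x, y - 1)))
-- ===== Notes on version B (the rewrite author's own statement) =====
-- stated objective: idiomatic
-- what changed: Instead of scanning every cell and testing the adjacency arithmetic, B builds a set of the cells once and membership-tests the four orthogonal neighbors of the given cell.
import Mathlib
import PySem

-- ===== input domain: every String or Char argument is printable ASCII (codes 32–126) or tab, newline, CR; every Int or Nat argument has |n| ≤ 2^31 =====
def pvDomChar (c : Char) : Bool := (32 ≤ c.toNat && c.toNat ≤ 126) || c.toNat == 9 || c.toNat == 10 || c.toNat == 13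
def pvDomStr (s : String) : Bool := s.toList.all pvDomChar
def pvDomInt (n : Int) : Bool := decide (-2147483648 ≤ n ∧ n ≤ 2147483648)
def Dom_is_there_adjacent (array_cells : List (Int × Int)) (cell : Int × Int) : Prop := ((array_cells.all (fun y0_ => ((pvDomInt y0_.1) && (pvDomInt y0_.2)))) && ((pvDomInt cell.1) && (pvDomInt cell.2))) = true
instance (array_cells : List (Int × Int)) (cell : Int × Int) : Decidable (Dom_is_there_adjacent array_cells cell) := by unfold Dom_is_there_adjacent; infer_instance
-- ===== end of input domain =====

-- B replaces A's scan-with-arithmetic by a set of the cells plus membership tests of the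
-- four orthogonal neighbors of `cell` (idiomatic; same asymptotic cost).


-- ===== PORT A =====
def is_there_adjacent (array_cells : List (Int × Int)) (cell : Int × Int) : Bool :=
  match array_cells with
  | [] => false
  | pit :: rest =>
    let x_cell := cell.1
    let y_cell := cell.2
    let x_pit := pit.1
    let y_pit := pit.2
    if |x_cell - x_pit| = 1 ∧ y_cell - y_pit = 0 then true
    else if |y_cell - y_pit| = 1 ∧ x_cell - x_pit = 0 then true
    else is_there_adjacent rest cell

-- ===== PORT B =====
def is_there_adjacent_alt (array_cells : List (Int × Int)) (cell : Int × Int) : Bool :=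
  let cells : PySem.Set (Int × Int) := PySem.Set.ofList array_cells
  let x := cell.1
  let y := cell.2
  [(x + 1, y), (x - 1, y), (x, y + 1), (x, y - 1)].any (fun n => PySem.Set.contains cells n)

-- ===== PRECONDITION & SPEC =====
def Spec_is_there_adjacent (array_cells : List (Int × Int)) (cell : Int × Int) (out : Bool) : Prop := out = is_there_adjacent_alt array_cells cell
instance (array_cells : List (Int × Int)) (cell : Int × Int) (out : Bool) : Decidable (Spec_is_there_adjacent array_cells cell out) := by unfold Spec_is_there_adjacent; infer_instance

-- ===== CLAIM (what is proved, stated in full; the proofs are below) =====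
def Claim_equal_is_there_adjacent : Prop := ∀ (array_cells : List (Int × Int)) (cell : Int × Int), Dom_is_there_adjacent array_cells cell → Spec_is_there_adjacent array_cells cell (is_there_adjacent array_cells cell)

-- ===== LEMMAS AND PROOFS =====

-- Both sides say: some cell of the list is orthogonally adjacent to `cell`.
theorem is_there_adjacent_eq_any (array_cells : List (Int × Int)) (cell : Int × Int) :
    is_there_adjacent array_cells cell
      = array_cells.any (fun p =>
          decide ((|cell.1 - p.1| = 1 ∧ cell.2 - p.2 = 0) ∨ (|cell.2 - p.2| = 1 ∧ cell.1 - p.1 = 0))) := by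
  induction array_cells with
  | nil => rfl
  | cons pit rest ih =>
    simp only [is_there_adjacent, List.any_cons, ih]
    by_cases h1 : |cell.1 - pit.1| = 1 ∧ cell.2 - pit.2 = 0
    · simp [h1]
    · by_cases h2 : |cell.2 - pit.2| = 1 ∧ cell.1 - pit.1 = 0
      · simp [h2]
      · simp [h1, h2]

theorem alt_iff (array_cells : List (Int × Int)) (cell : Int × Int) :
    is_there_adjacent_alt array_cells cell = true ↔
      ∃ p ∈ array_cells,
        (|cell.1 - p.1| = 1 ∧ cell.2 - p.2 = 0) ∨ (|cell.2 - p.2| = 1 ∧ cell.1 - p.1 = 0) := by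
  simp only [is_there_adjacent_alt, List.any_eq_true, List.mem_cons,
    PySem.Set.contains_iff, PySem.Set.mem_ofList]
  constructor
  · rintro ⟨n, hn, hmem⟩
    refine ⟨n, hmem, ?_⟩
    obtain ⟨c1, c2⟩ := cell
    obtain h | h | h | h | h := hn
    · subst h; left; constructor <;> [skip; ring]; rw [show c1 - (c1 + 1) = -1 by ring]; decide
    · subst h; left; constructor <;> [skip; ring]; rw [show c1 - (c1 - 1) = 1 by ring]; decide
    · subst h; right; constructor <;> [skip; ring]; rw [show c2 - (c2 + 1) = -1 by ring]; decide
    · subst h; right; constructor <;> [skip; ring]; rw [show c2 - (c2 - 1) = 1 by ring]; decide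
    · exact absurd h (by simp)
  · rintro ⟨p, hp, hadj⟩
    refine ⟨p, ?_, hp⟩
    obtain ⟨p1, p2⟩ := p
    obtain ⟨c1, c2⟩ := cell
    rcases hadj with ⟨h1, h2⟩ | ⟨h1, h2⟩ <;>
      rcases abs_eq (by norm_num : (0:Int) ≤ 1) |>.mp h1 with h | h <;>
      simp [Prod.ext_iff] <;> omega

-- ===== VERDICT (by name: the statement is the Claim_ definition above) =====
theorem is_there_adjacent_spec : Claim_equal_is_there_adjacent := by
  intro array_cells cell _
  unfold Spec_is_there_adjacent
  rw [is_there_adjacent_eq_any]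
  rcases h : is_there_adjacent_alt array_cells cell with _ | _
  · rw [List.any_eq_false]
    intro p hp
    simp only [decide_eq_true_eq]
    intro hadj
    have : is_there_adjacent_alt array_cells cell = true := (alt_iff _ _).mpr ⟨p, hp, hadj⟩
    simp [h] at this
  · rw [List.any_eq_true]
    obtain ⟨p, hp, hadj⟩ := (alt_iff _ _).mp h
    exact ⟨p, hp, by simpa using hadj⟩
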